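-- pv_equiv track=rewrite | github.com/hieule1704/Python-Exercises-Collection | Bài tập Chuyên đề Python/Chương 5/DTH225642.Chuong05.Bai06.py | nagative_number_in_string
-- ===== SOURCE A (Python) =====
-- def nagative_number_in_string(string):
--     nagative_numbers = []
--     for i in range(len(string)):
--         if string[i] == '-':
--             if string[i+1].isdigit():
--                 num = check_next_number(string[i+1:len(string)-1]) * (-1)
--                 nagative_numbers.append(num)
--     return nagative_numbers
--
-- def check_next_number(string):
--     num = []
--     for i in range(len(string)):
--         if string[i].isdigit():
--             num.append(string[i])
--         else:
--             break
--
--     sum = ''.join(num)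
--     return int(sum)
-- ===== SOURCE B (Python) =====
-- def nagative_number_in_string(string):
--     res = []
--     i, n = 0, len(string)
--     while i < n:
--         if string[i] == '-':
--             j = i + 1
--             while j < n and string[j].isdigit():
--                 j += 1
--             if j > i + 1:
--                 res.append(-int(string[i + 1:j]))
--                 i = j
--                 continue
--         i += 1
--     return res
-- ===== Notes on version B (the rewrite author's own statement) =====
-- stated objective: alternative
-- what changed: B replaces A's per-position rescan (a fresh slice and digit walk via check_next_number at every '-') with a single index-based left-to-right pass that reads each digit run once and jumps past it (worst-case O(n) vs A's O(n^2)), and fixes A's off-by-one slice string[i+1:len(string)-1] that drops the string's last character.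
-- intended difference: On strings that end with a negative number (a nonempty digit run running to the end of the string, immediately preceded by '-'), A slices only up to len(string)-1 and so returns that number with its last digit chopped off (e.g. [-1] for '-12'), while B returns the full number [-12], which is the intended value. — e.g. on nagative_number_in_string("-12"): A returns [-1], B returns [-12]
import Mathlib
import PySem

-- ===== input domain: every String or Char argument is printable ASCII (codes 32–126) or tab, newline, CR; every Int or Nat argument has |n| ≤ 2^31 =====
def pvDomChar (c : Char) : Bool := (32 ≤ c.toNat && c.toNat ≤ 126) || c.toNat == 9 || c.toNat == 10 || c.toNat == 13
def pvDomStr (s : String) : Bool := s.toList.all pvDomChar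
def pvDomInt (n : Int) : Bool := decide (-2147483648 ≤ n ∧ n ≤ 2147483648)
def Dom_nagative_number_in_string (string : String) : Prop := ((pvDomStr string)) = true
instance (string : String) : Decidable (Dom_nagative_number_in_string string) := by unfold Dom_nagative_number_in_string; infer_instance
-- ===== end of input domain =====

-- B: one index pass reading each digit run once (A rescans through a fresh slice per '-'); B also
-- returns the full last number where A's slice string[i+1:len(string)-1] chops off the final digit.

-- int(s) for the DIGIT-ONLY strings the two programs ever build (check_next_number joins only
-- '0'..'9' characters, and B slices a nonempty digit run): exact there — leading zeros allowed,
-- value is the usual base-10 fold; int('') raises ValueError, hence none below.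
def pvStep (a : Int) (c : Char) : Int := a * 10 + ((c.toNat : Int) - 48)
def pvDigitsVal (l : List Char) : Int := l.foldl pvStep 0
def pvInt? (l : List Char) : Option Int := if l = [] then none else some (pvDigitsVal l)

-- ===== PORT A =====
-- check_next_number's loop with break (collects leading digits), as literal recursion
def pvCheckDigits : List Char → List Char
  | [] => []
  | c :: t => if PySem.Chars.isdigit c then c :: pvCheckDigits t else []

-- int(''.join(num)); int('') would raise ValueError (none) — excluded by Pre_, default 0 unused there
def pvCheckNext (l : List Char) : Int := (pvInt? l).getD 0

-- the for-i loop; a none from pyGet? is Python's IndexError on string[i+1] — excluded by Pre_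
def pvA (l : List Char) : List Int :=
  (List.range l.length).foldl (fun acc (i : Nat) =>
    if PySem.List.pyGetD l (i : Int) ' ' = '-' then
      if (PySem.List.pyGet? l ((i : Int) + 1)).elim false PySem.Chars.isdigit then
        acc ++ [pvCheckNext (pvCheckDigits
                  (PySem.List.slice l (some ((i : Int) + 1)) (some ((l.length : Int) - 1)))) * (-1)]
      else acc
    else acc) []

def nagative_number_in_string (string : String) : List Int := pvA string.toList

-- ===== PORT B =====
-- Source B's while-loop: at '-', read the following digit run, emit -int(run), jump i past it; the
-- loop body runs at most len(string) times, which the structural fuel argument makes explicit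
def pvScanF : Nat → List Char → List Int
  | 0, _ => []
  | _ + 1, [] => []
  | fuel + 1, c :: t =>
    let run := t.takeWhile PySem.Chars.isdigit
    if c = '-' ∧ run ≠ [] then
      (-(pvDigitsVal run)) :: pvScanF fuel (t.drop run.length)
    else pvScanF fuel t

def nagative_number_in_string_alt (string : String) : List Int :=
  pvScanF string.toList.length string.toList

-- ===== PRECONDITION & SPEC =====
-- Pre_ excludes exactly the inputs where A raises: a trailing '-' (IndexError on string[i+1]) and a
-- string ending in '-' plus one digit (the slice handed to check_next_number is empty, so int('')
-- raises ValueError).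
def Pre_nagative_number_in_string (string : String) : Prop :=
  ¬ (string.toList.reverse.head? = some '-') ∧
  ¬ ((string.toList.reverse.head?.elim false PySem.Chars.isdigit) = true ∧
     string.toList.reverse.tail.head? = some '-')
instance (string : String) : Decidable (Pre_nagative_number_in_string string) := by
  unfold Pre_nagative_number_in_string; infer_instance

def pvWitness_nagative_number_in_string : String := "a-12b"

-- On strings ending with a '-'-preceded nonempty digit run that is not all zeros, A returns that
-- last number with its final digit dropped (off-by-one slice to len(string)-1), B returns the full
-- number, the intended value (on an all-zero run both numbers are 0, so those strings lie outside D_).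
def D_nagative_number_in_string (string : String) : Prop :=
  string.toList.reverse.takeWhile PySem.Chars.isdigit ≠ [] ∧
  (string.toList.reverse.dropWhile PySem.Chars.isdigit).head? = some '-' ∧
  (string.toList.reverse.takeWhile PySem.Chars.isdigit).any (· != '0') = true
instance (string : String) : Decidable (D_nagative_number_in_string string) := by
  unfold D_nagative_number_in_string; infer_instance

def Spec_nagative_number_in_string (string : String) (out : List Int) : Prop :=
  ¬ D_nagative_number_in_string string → out = nagative_number_in_string_alt string
instance (string : String) (out : List Int) : Decidable (Spec_nagative_number_in_string string out) := by
  unfold Spec_nagative_number_in_string; infer_instance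

def pvDiffWitness_nagative_number_in_string : String := "-12"
def pvDiffWitnessOut_nagative_number_in_string : (List Int) × (List Int) := ([-1], [-12])

-- ===== CLAIM (what is proved, stated in full; the proofs are below) =====
def Claim_unchanged_nagative_number_in_string : Prop := ∀ (string : String), Dom_nagative_number_in_string string → Pre_nagative_number_in_string string → Spec_nagative_number_in_string string (nagative_number_in_string string)
def Claim_changed_nagative_number_in_string : Prop := Dom_nagative_number_in_string (pvDiffWitness_nagative_number_in_string) ∧ Pre_nagative_number_in_string (pvDiffWitness_nagative_number_in_string) ∧ D_nagative_number_in_string (pvDiffWitness_nagative_number_in_string) ∧ nagative_number_in_string (pvDiffWitness_nagative_number_in_string) = pvDiffWitnessOut_nagative_number_in_string.1 ∧ nagative_number_in_string_alt (pvDiffWitness_nagative_number_in_string) = pvDiffWitnessOut_nagative_number_in_string.2 ∧ pvDiffWitnessOut_nagative_number_in_string.1 ≠ pvDiffWitnessOut_nagative_number_in_string.2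
def Claim_exact_nagative_number_in_string : Prop := ∀ (string : String), Dom_nagative_number_in_string string → Pre_nagative_number_in_string string → D_nagative_number_in_string string → nagative_number_in_string string ≠ nagative_number_in_string_alt string

-- ===== LEMMAS AND PROOFS =====

-- the condition and the value A's loop body uses at position i, as standalone functions
def pvPb (l : List Char) (i : Nat) : Bool :=
  (PySem.List.pyGetD l (i : Int) ' ' == '-') &&
  ((PySem.List.pyGet? l ((i : Int) + 1)).elim false PySem.Chars.isdigit)

def pvFv (l : List Char) (i : Nat) : Int :=
  pvCheckNext (pvCheckDigits
    (PySem.List.slice l (some ((i : Int) + 1)) (some ((l.length : Int) - 1)))) * (-1)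

-- the D-condition on raw character lists, with the final digit run named
def pvBad (l : List Char) : Prop :=
  l.reverse.takeWhile PySem.Chars.isdigit ≠ [] ∧
  (l.reverse.dropWhile PySem.Chars.isdigit).head? = some '-' ∧
  (l.reverse.takeWhile PySem.Chars.isdigit).any (· != '0') = true

theorem pvCheckNext_eq (l : List Char) : pvCheckNext l = pvDigitsVal l := by
  unfold pvCheckNext pvInt?
  split
  · simp_all [pvDigitsVal]
  · simp

theorem pvA_eq (l : List Char) :
    pvA l = ((List.range l.length).filter (pvPb l)).map (pvFv l) := by
  unfold pvA
  have hf : (fun (acc : List Int) (i : Nat) =>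
      if PySem.List.pyGetD l (i : Int) ' ' = '-' then
        if (PySem.List.pyGet? l ((i : Int) + 1)).elim false PySem.Chars.isdigit then
          acc ++ [pvCheckNext (pvCheckDigits
                    (PySem.List.slice l (some ((i : Int) + 1)) (some ((l.length : Int) - 1)))) * (-1)]
        else acc
      else acc)
      = (fun acc i => if pvPb l i then acc ++ [pvFv l i] else acc) := by
    funext acc i
    by_cases h1 : PySem.List.pyGetD l (i : Int) ' ' = '-' <;>
      by_cases h2 : (PySem.List.pyGet? l ((i : Int) + 1)).elim false PySem.Chars.isdigit <;>
      simp [pvPb, pvFv, h1, h2]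
  rw [hf, PySem.List.foldl_append_if]
  simp

theorem pvPb_cons_succ (c : Char) (t : List Char) (i : Nat) : pvPb (c :: t) (i + 1) = pvPb t i := by
  have h1 : ((i + 1 : Nat) : Int) + 1 = ((i + 2 : Nat) : Int) := by push_cast; ring
  have h2 : ((i : Nat) : Int) + 1 = ((i + 1 : Nat) : Int) := by push_cast; ring
  simp only [pvPb, h1, h2, PySem.List.pyGetD_natCast, PySem.List.pyGet?_natCast]
  simp

theorem pvFv_cons_succ (c : Char) (t : List Char) (i : Nat) : pvFv (c :: t) (i + 1) = pvFv t i := by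
  rcases t with _ | ⟨d, u⟩
  · simp [pvFv, PySem.List.slice]
  · have h1 : ((i + 1 : Nat) : Int) + 1 = ((i + 2 : Nat) : Int) := by push_cast; ring
    have h2 : ((c :: d :: u).length : Int) - 1 = (((d :: u).length : Nat) : Int) := by
      simp
    have h3 : ((i : Nat) : Int) + 1 = ((i + 1 : Nat) : Int) := by push_cast; ring
    have h4 : (((d :: u).length : Nat) : Int) - 1 = (((d :: u).length - 1 : Nat) : Int) := by
      simp
    simp only [pvFv, h1, h2, h3, h4, PySem.List.slice_natCast]
    have h5 : (d :: u).length - (i + 2) = (d :: u).length - 1 - (i + 1) := by omega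
    simp [h5]

theorem pvPb_zero (c : Char) (t : List Char) :
    pvPb (c :: t) 0 = ((c == '-') && (t.head?.elim false PySem.Chars.isdigit)) := by
  have h2 : (0 : Int) + 1 = ((1 : Nat) : Int) := by norm_num
  simp only [pvPb, Nat.cast_zero, h2, PySem.List.pyGet?_natCast]
  rcases t with _ | ⟨d, u⟩ <;> simp [PySem.List.pyGetD_zero_cons]

theorem headDigit_iff (t : List Char) :
    (t.head?.elim false PySem.Chars.isdigit) = true ↔ t.takeWhile PySem.Chars.isdigit ≠ [] := by
  rcases t with _ | ⟨d, u⟩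
  · simp
  · by_cases h : PySem.Chars.isdigit d <;> simp [List.takeWhile_cons, h]

theorem pvA_cons (c : Char) (t : List Char) :
    pvA (c :: t) = (if pvPb (c :: t) 0 then [pvFv (c :: t) 0] else []) ++ pvA t := by
  rw [pvA_eq, pvA_eq]
  rw [show (c :: t).length = t.length + 1 from rfl, List.range_succ_eq_map]
  rw [List.filter_cons]
  by_cases h0 : pvPb (c :: t) 0 <;>
    simp [h0, List.filter_map, List.map_map, Function.comp_def, pvPb_cons_succ, pvFv_cons_succ]

theorem pvCheckDigits_eq_takeWhile (l : List Char) :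
    pvCheckDigits l = l.takeWhile PySem.Chars.isdigit := by
  induction l with
  | nil => rfl
  | cons c t ih => by_cases h : PySem.Chars.isdigit c <;> simp [pvCheckDigits, h, ih]

theorem takeWhile_take {α : Type} (p : α → Bool) (l : List α) (m : Nat) :
    (l.take m).takeWhile p = (l.takeWhile p).take m := by
  induction l generalizing m with
  | nil => simp
  | cons c t ih =>
    rcases m with _ | m
    · simp
    · by_cases h : p c <;> simp [List.takeWhile_cons, h, ih]

theorem dropWhile_append_stop {α : Type} (p : α → Bool) (xs ys : List α)
    (h : xs.dropWhile p ≠ []) :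
    (xs ++ ys).takeWhile p = xs.takeWhile p ∧
    (xs ++ ys).dropWhile p = xs.dropWhile p ++ ys := by
  induction xs with
  | nil => simp at h
  | cons c t ih =>
    by_cases hc : p c
    · have h' : t.dropWhile p ≠ [] := by simpa [List.dropWhile_cons, hc] using h
      rcases ih h' with ⟨h1, h2⟩
      simp [List.takeWhile_cons, List.dropWhile_cons, hc, h1, h2]
    · simp [List.takeWhile_cons, List.dropWhile_cons, hc]

theorem takeWhile_append_all {α : Type} (p : α → Bool) (xs ys : List α)
    (h : ∀ x ∈ xs, p x) :
    (xs ++ ys).takeWhile p = xs ++ ys.takeWhile p ∧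
    (xs ++ ys).dropWhile p = ys.dropWhile p := by
  induction xs with
  | nil => simp
  | cons c t ih =>
    have hc : p c := h c (by simp)
    rcases ih (fun x hx => h x (by simp [hx])) with ⟨h1, h2⟩
    simp [List.takeWhile_cons, List.dropWhile_cons, hc, h1, h2]

theorem takeWhile_append_drop_self {α : Type} (p : α → Bool) (l : List α) :
    l.takeWhile p ++ l.drop (l.takeWhile p).length = l := by
  induction l with
  | nil => rfl
  | cons c t ih => by_cases h : p c <;> simp [List.takeWhile_cons, h, ih]

-- a bad suffix stays bad under any prefix (the final run is unchanged)
theorem pvBad_suffix (v u : List Char) (h : pvBad u) : pvBad (v ++ u) := by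
  rcases h with ⟨h1, h2, h3⟩
  have hne : u.reverse.dropWhile PySem.Chars.isdigit ≠ [] := by
    intro hnil; rw [hnil] at h2; simp at h2
  rcases dropWhile_append_stop PySem.Chars.isdigit u.reverse v.reverse hne with ⟨ht, hd⟩
  refine ⟨?_, ?_, ?_⟩
  · rw [List.reverse_append, ht]; exact h1
  · rw [List.reverse_append, hd]
    rcases hu : u.reverse.dropWhile PySem.Chars.isdigit with _ | ⟨a, b⟩
    · exact absurd hu hne
    · rw [hu] at h2; simpa using h2
  · rw [List.reverse_append, ht]; exact h3

-- badness transfers to a suffix that still contains a non-digit character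
theorem pvBad_drop (xs u : List Char) (hnd : ¬ ∀ x ∈ u, PySem.Chars.isdigit x)
    (h : pvBad (xs ++ u)) :
    pvBad u ∧ (xs ++ u).reverse.takeWhile PySem.Chars.isdigit
            = u.reverse.takeWhile PySem.Chars.isdigit := by
  have hdw : u.reverse.dropWhile PySem.Chars.isdigit ≠ [] := by
    intro h0
    exact hnd (fun x hx =>
      List.dropWhile_eq_nil_iff.mp h0 x (List.mem_reverse.mpr hx))
  rcases dropWhile_append_stop PySem.Chars.isdigit u.reverse xs.reverse hdw with ⟨ht, hd⟩
  rcases h with ⟨h1, h2, h3⟩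
  rw [List.reverse_append, ht] at h1 h3
  rw [List.reverse_append, hd] at h2
  have h2' : (u.reverse.dropWhile PySem.Chars.isdigit).head? = some '-' := by
    rcases hu : u.reverse.dropWhile PySem.Chars.isdigit with _ | ⟨a, b⟩
    · exact absurd hu hdw
    · rw [hu] at h2; simpa using h2
  exact ⟨⟨h1, h2', h3⟩, by rw [List.reverse_append, ht]⟩

theorem digit_toNat {c : Char} (h : PySem.Chars.isdigit c = true) :
    48 ≤ c.toNat ∧ c.toNat ≤ 57 := by
  simp only [PySem.Chars.isdigit, Bool.and_eq_true, decide_eq_true_eq] at h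
  rcases h with ⟨h1, h2⟩
  rw [Char.le_def] at h1 h2
  exact ⟨h1, h2⟩

theorem digit_ne_dash {c : Char} (h : PySem.Chars.isdigit c = true) : (c == '-') = false := by
  by_cases hc : c = '-'
  · subst hc; exact absurd h (by decide)
  · simp [hc]

theorem char_eq_zero_of_toNat {c : Char} (h : c.toNat = 48) : c = '0' :=
  Char.ext (UInt32.toNat_inj.mp h)

theorem pvStep_ge {a : Int} {c : Char} (hc : PySem.Chars.isdigit c = true) (ha : 0 ≤ a) :
    a ≤ pvStep a c ∧ 0 ≤ pvStep a c := by
  rcases digit_toNat hc with ⟨h1, _⟩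
  unfold pvStep
  constructor <;> [skip; skip] <;> nlinarith [Int.ofNat_le.mpr h1, ha]

theorem foldl_pvStep_ge (l : List Char) : ∀ a : Int, (∀ c ∈ l, PySem.Chars.isdigit c) →
    0 ≤ a → a ≤ l.foldl pvStep a := by
  induction l with
  | nil => intro a _ _; simp
  | cons c t ih =>
    intro a hd ha
    have hc := hd c (by simp)
    rcases pvStep_ge hc ha with ⟨hge, hnn⟩
    calc a ≤ pvStep a c := hge
      _ ≤ (c :: t).foldl pvStep a := by
          simpa using ih (pvStep a c) (fun x hx => hd x (by simp [hx])) hnn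

theorem foldl_pvStep_zeros (l : List Char) (h : ∀ c ∈ l, c = '0') :
    l.foldl pvStep 0 = 0 := by
  induction l with
  | nil => rfl
  | cons c t ih =>
    have hc : c = '0' := h c (by simp)
    subst hc
    have : pvStep 0 '0' = 0 := by decide
    simpa [this] using ih (fun x hx => h x (by simp [hx]))

theorem foldl_pvStep_pos (l : List Char) : ∀ a : Int, (∀ c ∈ l, PySem.Chars.isdigit c) →
    0 ≤ a → (∃ c ∈ l, c ≠ '0') → 0 < l.foldl pvStep a := by
  induction l with
  | nil => intro a _ _ h; simp at h
  | cons c t ih =>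
    intro a hd ha hw
    have hc := hd c (by simp)
    rcases pvStep_ge hc ha with ⟨_, hnn⟩
    by_cases hct : ∃ x ∈ t, x ≠ '0'
    · simpa using ih (pvStep a c) (fun x hx => hd x (by simp [hx])) hnn hct
    · have hcz : c ≠ '0' := by
        rcases hw with ⟨x, hx, hxz⟩
        rcases List.mem_cons.mp hx with h | h
        · exact h ▸ hxz
        · exact absurd ⟨x, h, hxz⟩ hct
      have h49 : 49 ≤ c.toNat := by
        rcases digit_toNat hc with ⟨h1, _⟩
        rcases Nat.lt_or_ge 48 c.toNat with h | h
        · omega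
        · exact absurd (char_eq_zero_of_toNat (by omega)) hcz
      have hpos : 0 < pvStep a c := by
        unfold pvStep
        nlinarith [Int.ofNat_le.mpr h49, ha]
      calc (0 : Int) < pvStep a c := hpos
        _ ≤ (c :: t).foldl pvStep a := by
            simpa using foldl_pvStep_ge t (pvStep a c) (fun x hx => hd x (by simp [hx])) hnn

theorem pvDigitsVal_concat (ys : List Char) (e : Char) :
    pvDigitsVal (ys ++ [e]) = pvDigitsVal ys * 10 + ((e.toNat : Int) - 48) := by
  unfold pvDigitsVal
  rw [List.foldl_append]
  rfl

-- the truncated and the full value differ as soon as one digit is nonzero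
theorem truncated_ne_full (ys : List Char) (e : Char)
    (hd : ∀ c ∈ ys ++ [e], PySem.Chars.isdigit c)
    (hw : ∃ c ∈ ys ++ [e], c ≠ '0') :
    pvDigitsVal ys ≠ pvDigitsVal (ys ++ [e]) := by
  intro heq
  rw [pvDigitsVal_concat] at heq
  have hynn : 0 ≤ pvDigitsVal ys :=
    foldl_pvStep_ge ys 0 (fun c hc => hd c (by simp [hc])) le_rfl
  have he := digit_toNat (hd e (by simp))
  have hy0 : pvDigitsVal ys = 0 ∧ (e.toNat : Int) = 48 := by
    constructor <;> nlinarith [Int.ofNat_le.mpr he.1, Int.ofNat_le.mpr he.2]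
  have hez : e = '0' := char_eq_zero_of_toNat (by
    have := hy0.2; omega)
  rcases hw with ⟨x, hx, hxz⟩
  rcases List.mem_append.mp hx with h | h
  · have : 0 < pvDigitsVal ys :=
      foldl_pvStep_pos ys 0 (fun c hc => hd c (by simp [hc])) le_rfl ⟨x, h, hxz⟩
    omega
  · simp at h
    exact hxz (h ▸ hez)

theorem pvA_digit_prefix (d u : List Char) (hd : ∀ x ∈ d, PySem.Chars.isdigit x) :
    pvA (d ++ u) = pvA u := by
  induction d with
  | nil => rfl
  | cons c t ih =>
    have hc := hd c (by simp)
    have hrest : ∀ x ∈ t, PySem.Chars.isdigit x := fun x hx => hd x (by simp [hx])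
    rw [List.cons_append, pvA_cons, pvPb_zero]
    simp [digit_ne_dash hc, ih hrest]

theorem pvScanF_cons (fuel : Nat) (c : Char) (t : List Char) :
    pvScanF (fuel + 1) (c :: t) =
      if c = '-' ∧ t.takeWhile PySem.Chars.isdigit ≠ [] then
        (-(pvDigitsVal (t.takeWhile PySem.Chars.isdigit))) ::
          pvScanF fuel (t.drop (t.takeWhile PySem.Chars.isdigit).length)
      else pvScanF fuel t := rfl

theorem pvScanF_nil (fuel : Nat) : pvScanF fuel [] = [] := by
  cases fuel <;> rfl

-- in the matched branch A's head value is -(value of the digit run truncated at len-1)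
theorem pvFv_zero_dash (t : List Char) :
    pvFv ('-' :: t) 0 =
      -(pvDigitsVal ((t.takeWhile PySem.Chars.isdigit).take (t.length - 1))) := by
  unfold pvFv
  have h2 : (('-' :: t).length : Int) - 1 = ((t.length : Nat) : Int) := by simp
  have h3 : (0 : Int) + 1 = ((1 : Nat) : Int) := by norm_num
  rw [show ((0 : Nat) : Int) = (0 : Int) from rfl, h3, h2, PySem.List.slice_natCast]
  have h4 : List.drop 1 ('-' :: t) = t := rfl
  rw [h4, pvCheckDigits_eq_takeWhile, takeWhile_take, pvCheckNext_eq]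
  ring

-- when the run stops before the end of the string, truncation is invisible
theorem run_take_eq (t : List Char) (hlt : (t.takeWhile PySem.Chars.isdigit).length < t.length) :
    (t.takeWhile PySem.Chars.isdigit).take (t.length - 1) = t.takeWhile PySem.Chars.isdigit :=
  List.take_of_length_le (by omega)

-- the final run of '-'::t when t is all digits
theorem run_of_dash_all (t : List Char) (hall : ∀ x ∈ t, PySem.Chars.isdigit x) :
    ('-' :: t).reverse.takeWhile PySem.Chars.isdigit = t.reverse ∧
    ('-' :: t).reverse.dropWhile PySem.Chars.isdigit = ['-'] := by
  have hdd : PySem.Chars.isdigit '-' = false := by decide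
  have hT := takeWhile_append_all PySem.Chars.isdigit t.reverse ['-']
    (fun x hx => hall x (by simpa using hx))
  constructor
  · rw [List.reverse_cons, hT.1]
    simp [List.takeWhile_cons, hdd]
  · rw [List.reverse_cons, hT.2]
    simp [List.dropWhile_cons, hdd]

-- a no-match head cannot carry the final run: badness moves to the tail
theorem pvBad_step_skip (c : Char) (t : List Char)
    (hc : ¬ (c = '-' ∧ t.takeWhile PySem.Chars.isdigit ≠ []))
    (h : pvBad (c :: t)) :
    pvBad t ∧ (c :: t).reverse.takeWhile PySem.Chars.isdigit
            = t.reverse.takeWhile PySem.Chars.isdigit := by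
  have hnd : ¬ ∀ x ∈ t, PySem.Chars.isdigit x := by
    intro hall
    rcases run_of_dash_all t hall with ⟨hrT, hrD⟩
    by_cases hdash : c = '-'
    · subst hdash
      apply hc
      refine ⟨rfl, ?_⟩
      have ht0 : t ≠ [] := by
        intro h0; subst h0
        rcases h with ⟨h1, _, _⟩
        simp [show PySem.Chars.isdigit '-' = false from by decide] at h1
      rw [List.takeWhile_eq_self_iff.mpr hall]
      exact ht0
    · rcases h with ⟨_, h2, _⟩
      have hT := takeWhile_append_all PySem.Chars.isdigit t.reverse [c]
        (fun x hx => hall x (by simpa using hx))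
      rw [List.reverse_cons, hT.2] at h2
      by_cases hcd : PySem.Chars.isdigit c
      · simp [List.dropWhile_cons, hcd] at h2
      · simp [List.dropWhile_cons, hcd] at h2
        exact hdash h2
  exact pvBad_drop [c] t hnd h

-- A and B do the same skip on a no-match head
theorem skip_heads (fuel : Nat) (c : Char) (t : List Char)
    (hc : ¬ (c = '-' ∧ t.takeWhile PySem.Chars.isdigit ≠ [])) :
    pvA (c :: t) = pvA t ∧ pvScanF (fuel + 1) (c :: t) = pvScanF fuel t := by
  have hPb0 : pvPb (c :: t) 0 = false := by
    rw [pvPb_zero]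
    by_cases hdash : c = '-'
    · subst hdash
      have hne : ¬ t.takeWhile PySem.Chars.isdigit ≠ [] := fun h => hc ⟨rfl, h⟩
      have hhd : (t.head?.elim false PySem.Chars.isdigit) = false := by
        cases hE : (t.head?.elim false PySem.Chars.isdigit) with
        | false => rfl
        | true => exact absurd ((headDigit_iff t).mp hE) hne
      simp [hhd]
    · simp [hdash]
  constructor
  · rw [pvA_cons, hPb0]; simp
  · rw [pvScanF_cons, if_neg hc]

theorem pv_main : ∀ (fuel : Nat) (l : List Char), l.length ≤ fuel → ¬ pvBad l →
    pvA l = pvScanF fuel l := by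
  intro fuel
  induction fuel with
  | zero =>
    intro l hl _
    have : l = [] := List.length_eq_zero_iff.mp (Nat.le_zero.mp hl)
    subst this; rfl
  | succ fuel ih =>
    intro l hl hbad
    rcases l with _ | ⟨c, t⟩
    · rfl
    · by_cases hc : c = '-' ∧ t.takeWhile PySem.Chars.isdigit ≠ []
      · rcases hc with ⟨hdash, hrun⟩
        subst hdash
        have hPb0 : pvPb ('-' :: t) 0 = true := by
          rw [pvPb_zero]
          simp [(headDigit_iff t).mpr hrun]
        have hcnd : ('-' : Char) = '-' ∧ t.takeWhile PySem.Chars.isdigit ≠ [] := ⟨rfl, hrun⟩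
        by_cases hfull : ∀ x ∈ t, PySem.Chars.isdigit x
        · -- the run reaches the end: ¬ pvBad forces it to be all zeros, both numbers are 0
          rcases run_of_dash_all t hfull with ⟨hrT, hrD⟩
          have ht0 : t ≠ [] := by
            intro h0; subst h0; simp at hrun
          have hzeros : ∀ x ∈ t, x = '0' := by
            by_contra hnz
            push_neg at hnz
            rcases hnz with ⟨x, hx, hxz⟩
            have hc3 : (('-' :: t).reverse.takeWhile PySem.Chars.isdigit).any (· != '0')
                = true := by
              rw [hrT]
              refine List.any_eq_true.mpr ⟨x, List.mem_reverse.mpr hx, ?_⟩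
              simpa using hxz
            exact hbad ⟨by rw [hrT]; simpa using ht0, by rw [hrD]; rfl, hc3⟩
          have hfr : t.takeWhile PySem.Chars.isdigit = t := List.takeWhile_eq_self_iff.mpr hfull
          have hvt : pvDigitsVal t = 0 := foldl_pvStep_zeros t hzeros
          have hvtake : pvDigitsVal (t.take (t.length - 1)) = 0 :=
            foldl_pvStep_zeros _ (fun x hx => hzeros x (List.mem_of_mem_take hx))
          rw [pvA_cons, hPb0, pvScanF_cons, if_pos hcnd]
          have hA2 : pvA t = [] := by
            have := pvA_digit_prefix t [] hfull
            simpa using this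
          rw [hfr]
          simp [pvFv_zero_dash, hfr, hvtake, hvt, hA2, pvScanF_nil]
        · -- the run stops before the end
          have hlt : (t.takeWhile PySem.Chars.isdigit).length < t.length := by
            rcases Nat.lt_or_ge (t.takeWhile PySem.Chars.isdigit).length t.length with h | h
            · exact h
            · exfalso
              have hpre := List.takeWhile_prefix (l := t) (p := PySem.Chars.isdigit)
              have heq : t.takeWhile PySem.Chars.isdigit = t :=
                List.IsPrefix.eq_of_length hpre
                  (Nat.le_antisymm (List.IsPrefix.length_le hpre) h)
              exact hfull fun x hx => List.mem_takeWhile_imp (heq ▸ hx)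
          have hsplit : t.takeWhile PySem.Chars.isdigit ++
              t.drop (t.takeWhile PySem.Chars.isdigit).length = t :=
            takeWhile_append_drop_self _ _
          have hbt : ¬ pvBad (t.drop (t.takeWhile PySem.Chars.isdigit).length) := by
            intro hb
            exact hbad (by
              have := pvBad_suffix ('-' :: t.takeWhile PySem.Chars.isdigit)
                (t.drop (t.takeWhile PySem.Chars.isdigit).length) hb
              simpa [List.cons_append, hsplit] using this)
          have htail : pvA t = pvScanF fuel (t.drop (t.takeWhile PySem.Chars.isdigit).length) := by
            calc pvA t = pvA (t.takeWhile PySem.Chars.isdigit ++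
                  t.drop (t.takeWhile PySem.Chars.isdigit).length) := by rw [hsplit]
              _ = pvA (t.drop (t.takeWhile PySem.Chars.isdigit).length) :=
                  pvA_digit_prefix _ _ (fun x hx => List.mem_takeWhile_imp hx)
              _ = pvScanF fuel (t.drop (t.takeWhile PySem.Chars.isdigit).length) :=
                  ih _ (by simp at hl ⊢; omega) hbt
          rw [pvA_cons, hPb0, pvScanF_cons, if_pos hcnd]
          simp [pvFv_zero_dash, run_take_eq t hlt, htail]
      · rcases skip_heads fuel c t hc with ⟨hA, hB⟩
        have hbt : ¬ pvBad t := fun hb => hbad (pvBad_suffix [c] t hb)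
        rw [hA, hB]
        exact ih t (by simpa using Nat.le_of_succ_le_succ hl) hbt

theorem pv_tight : ∀ (fuel : Nat) (l : List Char), l.length ≤ fuel → pvBad l →
    2 ≤ (l.reverse.takeWhile PySem.Chars.isdigit).length →
    pvA l ≠ pvScanF fuel l := by
  intro fuel
  induction fuel with
  | zero =>
    intro l hl hbad _
    have : l = [] := List.length_eq_zero_iff.mp (Nat.le_zero.mp hl)
    subst this
    rcases hbad with ⟨h1, _, _⟩
    simp at h1
  | succ fuel ih =>
    intro l hl hbad h2
    rcases l with _ | ⟨c, t⟩
    · rcases hbad with ⟨h1, _, _⟩; simp at h1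
    · by_cases hc : c = '-' ∧ t.takeWhile PySem.Chars.isdigit ≠ []
      · rcases hc with ⟨hdash, hrun⟩
        subst hdash
        have hPb0 : pvPb ('-' :: t) 0 = true := by
          rw [pvPb_zero]
          simp [(headDigit_iff t).mpr hrun]
        have hcnd : ('-' : Char) = '-' ∧ t.takeWhile PySem.Chars.isdigit ≠ [] := ⟨rfl, hrun⟩
        by_cases hfull : ∀ x ∈ t, PySem.Chars.isdigit x
        · -- the run reaches the end: A's number is truncated, B's is full; with a nonzero digit they differ
          rcases run_of_dash_all t hfull with ⟨hrT, hrD⟩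
          have hfr : t.takeWhile PySem.Chars.isdigit = t := List.takeWhile_eq_self_iff.mpr hfull
          have hlen2 : 2 ≤ t.length := by
            rw [hrT] at h2; simpa using h2
          have hnz : ∃ x ∈ t, x ≠ '0' := by
            rcases hbad with ⟨_, _, h3⟩
            rw [hrT] at h3
            rcases List.any_eq_true.mp h3 with ⟨x, hx, hxz⟩
            exact ⟨x, List.mem_reverse.mp hx, by simpa using hxz⟩
          rcases (List.eq_nil_or_concat t) with h0 | ⟨ys, e, hye⟩
          · subst h0; simp at hlen2
          · rw [List.concat_eq_append] at hye
            subst hye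
            have htake : (ys ++ [e]).take ((ys ++ [e]).length - 1) = ys := by
              simp
            rw [pvA_cons, hPb0, pvScanF_cons, if_pos hcnd]
            have hA2 : pvA (ys ++ [e]) = [] := by
              have := pvA_digit_prefix (ys ++ [e]) [] hfull
              simpa using this
            have hne := truncated_ne_full ys e hfull hnz
            rw [hfr]
            simp only [pvFv_zero_dash, hfr, htake, hA2, List.drop_length, pvScanF_nil]
            intro hEq
            simp at hEq
            exact hne (by omega)
        · -- the run stops before the end: equal heads, the difference lives in the tail
          have hlt : (t.takeWhile PySem.Chars.isdigit).length < t.length := by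
            rcases Nat.lt_or_ge (t.takeWhile PySem.Chars.isdigit).length t.length with h | h
            · exact h
            · exfalso
              have hpre := List.takeWhile_prefix (l := t) (p := PySem.Chars.isdigit)
              have heq : t.takeWhile PySem.Chars.isdigit = t :=
                List.IsPrefix.eq_of_length hpre
                  (Nat.le_antisymm (List.IsPrefix.length_le hpre) h)
              exact hfull fun x hx => List.mem_takeWhile_imp (heq ▸ hx)
          have hsplit : t.takeWhile PySem.Chars.isdigit ++
              t.drop (t.takeWhile PySem.Chars.isdigit).length = t :=
            takeWhile_append_drop_self _ _
          have hndu : ¬ ∀ x ∈ t.drop (t.takeWhile PySem.Chars.isdigit).length,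
              PySem.Chars.isdigit x := by
            intro hall
            apply hfull
            intro x hx
            rw [← hsplit] at hx
            rcases List.mem_append.mp hx with h | h
            · exact List.mem_takeWhile_imp h
            · exact hall x h
          have hbadt : pvBad (('-' :: t.takeWhile PySem.Chars.isdigit) ++
              t.drop (t.takeWhile PySem.Chars.isdigit).length) := by
            have : ('-' :: t.takeWhile PySem.Chars.isdigit) ++
                t.drop (t.takeWhile PySem.Chars.isdigit).length = '-' :: t := by
              rw [List.cons_append, hsplit]
            rw [this]; exact hbad
          rcases pvBad_drop _ _ hndu hbadt with ⟨hbu, hreq⟩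
          have h2u : 2 ≤ ((t.drop (t.takeWhile PySem.Chars.isdigit).length).reverse.takeWhile
              PySem.Chars.isdigit).length := by
            rw [← hreq]
            have : ('-' :: t.takeWhile PySem.Chars.isdigit) ++
                t.drop (t.takeWhile PySem.Chars.isdigit).length = '-' :: t := by
              rw [List.cons_append, hsplit]
            rw [this]
            exact h2
          have htail : pvA t = pvA (t.drop (t.takeWhile PySem.Chars.isdigit).length) := by
            calc pvA t = pvA (t.takeWhile PySem.Chars.isdigit ++
                  t.drop (t.takeWhile PySem.Chars.isdigit).length) := by rw [hsplit]
              _ = pvA (t.drop (t.takeWhile PySem.Chars.isdigit).length) :=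
                  pvA_digit_prefix _ _ (fun x hx => List.mem_takeWhile_imp hx)
          have hihne := ih (t.drop (t.takeWhile PySem.Chars.isdigit).length)
            (by simp at hl ⊢; omega) hbu h2u
          rw [pvA_cons, hPb0, pvScanF_cons, if_pos hcnd]
          simp only [pvFv_zero_dash, run_take_eq t hlt, htail]
          intro hEq
          exact hihne (by simpa using hEq)
      · rcases skip_heads fuel c t hc with ⟨hA, hB⟩
        rcases pvBad_step_skip c t hc hbad with ⟨hbt, hreq⟩
        have h2t : 2 ≤ (t.reverse.takeWhile PySem.Chars.isdigit).length := by
          rw [← hreq]; exact h2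
        rw [hA, hB]
        exact ih t (by simpa using Nat.le_of_succ_le_succ hl) hbt h2t

-- Pre_ together with D_ forces the final run to have at least two digits
theorem run_len_two (s : String) (hpre : Pre_nagative_number_in_string s)
    (hD : D_nagative_number_in_string s) :
    2 ≤ (s.toList.reverse.takeWhile PySem.Chars.isdigit).length := by
  rcases hD with ⟨h1, h2, _⟩
  rcases hrun : s.toList.reverse.takeWhile PySem.Chars.isdigit with _ | ⟨a, b⟩
  · exact absurd hrun h1
  · rcases b with _ | ⟨a', b'⟩
    · exfalso
      apply hpre.2
      have hsplit := List.takeWhile_append_dropWhile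
        (p := PySem.Chars.isdigit) (l := s.toList.reverse)
      rw [hrun] at hsplit
      have hda : PySem.Chars.isdigit a = true :=
        List.mem_takeWhile_imp (by rw [hrun]; simp)
      constructor
      · rw [← hsplit]; simpa using hda
      · rw [← hsplit]; simpa using h2
    · simp

-- ===== VERDICT (by name: the statement is the Claim_ definition above) =====
theorem nagative_number_in_string_spec : Claim_unchanged_nagative_number_in_string := by
  intro s _ _ hD
  exact pv_main s.toList.length s.toList le_rfl hD

set_option maxRecDepth 8000 in
theorem nagative_number_in_string_changed : Claim_changed_nagative_number_in_string := by
  unfold Claim_changed_nagative_number_in_string; decide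

theorem nagative_number_in_string_tight : Claim_exact_nagative_number_in_string := by
  intro s _ hpre hD
  exact pv_tight s.toList.length s.toList le_rfl hD (run_len_two s hpre hD)
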